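-- pv_equiv track=rewrite | github.com/stanford-futuredata/parallel-lb-simulator | FINAL_2_CLUSTER_LATENCY/findNumClusters.py | count_all_clusters
-- ===== SOURCE A (Python) =====
-- from collections import Counter
--
-- NUM_SERVERS = 5
--
-- SHARDS_PER_SERVER = 53
--
-- QUERY_SIZE = 3
--
-- def count_all_clusters(shards):
--     shards = sorted(shards)
--     cluster_counts = Counter()
--     for index, start_shard in enumerate(shards):
--         current_distance = 1
--         current_shard_index = index
--         current_cluster_size = 1
--
--         while current_distance <= QUERY_SIZE:
--             cluster_counts[current_cluster_size] += 1
--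
--             prev_shard = shards[current_shard_index]
--
--             current_shard_index += 1
--             current_cluster_size += 1
--
--             if current_shard_index >= len(shards):
--                 current_shard_index = 0
--                 current_distance += shards[0] + NUM_SERVERS * SHARDS_PER_SERVER - prev_shard
--             else:
--                 current_distance += shards[current_shard_index] - prev_shard
--
--     return cluster_counts
-- ===== SOURCE B (Python) =====
-- from collections import Counter
-- from bisect import bisect_right
--
-- NUM_SERVERS = 5
--
-- SHARDS_PER_SERVER = 53
--
-- QUERY_SIZE = 3
--
-- def count_all_clusters(shards):
--     s = sorted(shards)
--     n = len(s)
--     result = Counter()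
--     if n == 0:
--         return result
--     ring = NUM_SERVERS * SHARDS_PER_SERVER
--     # reach[i] = number of consecutive ring positions from shard i within QUERY_SIZE
--     reach = []
--     for i, x in enumerate(s):
--         thr = x + QUERY_SIZE - 1
--         j = bisect_right(s, thr)
--         if j < n:
--             reach.append(j - i)
--         else:
--             reach.append(n + bisect_right(s, thr - ring) - i)
--     hist = Counter(reach)
--     kmax = max(reach)
--     suffix = 0
--     ge = {}
--     for size in range(kmax, 0, -1):
--         suffix += hist[size]
--         ge[size] = suffix
--     for size in range(1, kmax + 1):
--         result[size] = ge[size]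
--     return result
-- ===== Notes on version B (the rewrite author's own statement) =====
-- stated objective: faster
-- what changed: A walks the sorted ring linearly from every start shard while updating the Counter at each step; B finds each start's reach with two bisect_right binary searches (one per lap) and then builds all cluster counts in one Counter + descending suffix-sum pass.
import Mathlib
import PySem

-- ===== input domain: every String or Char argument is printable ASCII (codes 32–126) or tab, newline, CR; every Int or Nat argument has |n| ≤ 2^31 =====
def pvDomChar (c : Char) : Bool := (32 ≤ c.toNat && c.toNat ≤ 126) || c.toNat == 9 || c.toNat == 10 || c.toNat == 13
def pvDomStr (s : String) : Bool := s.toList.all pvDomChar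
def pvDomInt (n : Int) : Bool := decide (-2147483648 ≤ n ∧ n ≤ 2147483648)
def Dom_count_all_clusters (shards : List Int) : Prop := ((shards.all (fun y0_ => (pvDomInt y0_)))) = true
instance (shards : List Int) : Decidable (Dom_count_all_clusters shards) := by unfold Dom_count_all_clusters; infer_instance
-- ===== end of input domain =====

-- B replaces A's per-start linear ring walk by binary searches over the sorted list plus a
-- suffix-sum histogram of the reach counts (objective: faster on inputs with large clusters).

-- ===== PORT A =====
-- A's inner while-loop, with a fuel parameter (always called with |s| + 1, which suffices:
-- the accumulated distance grows by 265 per full wrap, so the loop runs at most |s| times).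
-- List indices used by A always stay in range, so the total pyGetD is exact here.
def caaWhile (s : List Int) (n : Int) : Nat → PySem.Dict Int Int → Int → Int → Int → PySem.Dict Int Int
  | 0, d, _, _, _ => d
  | fuel+1, d, dist, idx, size =>
    if dist ≤ 3 then
      let d' := d.modify size 0 (· + 1)
      let prev := PySem.List.pyGetD s idx 0
      let idx' := idx + 1
      let size' := size + 1
      if idx' ≥ n then
        caaWhile s n fuel d' (dist + (PySem.List.pyGetD s 0 0 + 5 * 53 - prev)) 0 size'
      else
        caaWhile s n fuel d' (dist + (PySem.List.pyGetD s idx' 0 - prev)) idx' size'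
    else d

def count_all_clusters (shards : List Int) : List (Int × Int) :=
  let s := PySem.List.sorted shards (fun x => x)
  ((PySem.List.enumerate s).foldl
    (fun cc p => caaWhile s (PySem.List.len s) (s.length + 1) cc 1 p.1 1)
    PySem.Dict.empty).items

-- ===== PORT B =====
-- B's per-start reach: index distance to the first ring position farther than QUERY_SIZE - 1,
-- found by bisect_right (second bisect for the wrapped lap); p = (i, s[i]) from enumerate.
def caaReach (s : List Int) (n : Nat) (p : Int × Int) : Int :=
  let thr := p.2 + 3 - 1
  let j := PySem.List.bisectRight s thr
  if j < n then (j : Int) - p.1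
  else (n : Int) + (PySem.List.bisectRight s (thr - 5 * 53) : Int) - p.1

-- ge[size] in Source B is always present when read, so getD is exact.
def count_all_clusters_alt (shards : List Int) : List (Int × Int) :=
  let s := PySem.List.sorted shards (fun x => x)
  let n := s.length
  if n = 0 then (PySem.Dict.empty : PySem.Dict Int Int).items
  else
    let reach := (PySem.List.enumerate s).foldl (fun acc p => acc ++ [caaReach s n p]) []
    let hist := PySem.Dict.counter reach
    match PySem.List.max? reach (fun y => y) with
    | none => []  -- unreachable: reach is nonempty here
    | some kmax =>
      let sg := (PySem.List.pyRange kmax 0 (-1)).foldl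
        (fun (st : Int × PySem.Dict Int Int) size =>
          (st.1 + hist.getD size 0, st.2.insert size (st.1 + hist.getD size 0)))
        (0, PySem.Dict.empty)
      ((PySem.List.pyRange 1 (kmax + 1)).foldl
        (fun (res : PySem.Dict Int Int) size => res.insert size (sg.2.getD size 0))
        PySem.Dict.empty).items

-- ===== PRECONDITION & SPEC =====
def Spec_count_all_clusters (shards : List Int) (out : List (Int × Int)) : Prop := out = count_all_clusters_alt shards
instance (shards : List Int) (out : List (Int × Int)) : Decidable (Spec_count_all_clusters shards out) := by unfold Spec_count_all_clusters; infer_instance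

-- ===== CLAIM (what is proved, stated in full; the proofs are below) =====
def Claim_equal_count_all_clusters : Prop := ∀ (shards : List Int), Dom_count_all_clusters shards → Spec_count_all_clusters shards (count_all_clusters shards)

-- ===== LEMMAS AND PROOFS =====

-- Value at ring position p (0 ≤ p < 2·|s|): the sorted list followed by a wrapped copy shifted by 265.
def pvVext (s : List Int) (p : Nat) : Int :=
  if p < s.length then s.getD p 0 else s.getD (p - s.length) 0 + 265

lemma pvK_ex (s : List Int) (i : Nat) : ∃ t, 1 ≤ t ∧ s.getD i 0 + 2 < pvVext s (i + t) := by
  refine ⟨max 1 s.length, le_max_left _ _, ?_⟩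
  rcases Nat.eq_zero_or_pos s.length with h | h
  · have hs : s = [] := List.length_eq_zero_iff.mp h
    subst hs
    simp [pvVext]
  · have hmax : max 1 s.length = s.length := by omega
    rw [hmax]
    have : ¬ (i + s.length < s.length) := by omega
    simp only [pvVext, this, if_false, Nat.add_sub_cancel]
    omega

-- Number of iterations of A's inner loop from start index i (= B's reach count).
def pvK (s : List Int) (i : Nat) : Nat := Nat.find (pvK_ex s i)

def pvBlock (k : Nat) : List Int := PySem.List.pyRange 1 ((k : Int) + 1)

def pvKs (s : List Int) : List Nat := (List.range s.length).map (pvK s)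

def pvS (s : List Int) : List Int := ((pvKs s).map pvBlock).flatten

def pvKmax (s : List Int) : Nat := (pvKs s).foldl max 0

lemma pvK_one_le (s : List Int) (i : Nat) : 1 ≤ pvK s i := (Nat.find_spec (pvK_ex s i)).1

lemma pvK_spec (s : List Int) (i : Nat) : s.getD i 0 + 2 < pvVext s (i + pvK s i) :=
  (Nat.find_spec (pvK_ex s i)).2

lemma pvK_min (s : List Int) (i t : Nat) (h1 : 1 ≤ t) (h2 : t < pvK s i) :
    pvVext s (i + t) ≤ s.getD i 0 + 2 := by
  have := Nat.find_min (pvK_ex s i) h2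
  simp only [not_and, not_lt] at this
  exact this h1

lemma pvK_le_len (s : List Int) (i : Nat) (hi : i < s.length) : pvK s i ≤ s.length := by
  apply Nat.find_le
  constructor
  · omega
  · have : ¬ (i + s.length < s.length) := by omega
    simp only [pvVext, this, if_false, Nat.add_sub_cancel]
    omega

-- A's inner loop, characterised: starting after c iterations it increments the counter at
-- keys c+1, …, pvK s i.
lemma caaWhile_spec (s : List Int) (i : Nat) (hi : i < s.length) :
    ∀ (fuel : Nat) (c : Nat), c ≤ pvK s i → pvK s i - c ≤ fuel → ∀ d,
    caaWhile s (PySem.List.len s) fuel d (1 + pvVext s (i + c) - s.getD i 0)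
      (((if i + c < s.length then i + c else i + c - s.length : Nat) : Int)) ((c : Int) + 1)
    = (PySem.List.pyRange ((c : Int) + 1) ((pvK s i : Int) + 1)).foldl
        (fun d z => d.modify z 0 (· + 1)) d := by
  intro fuel
  induction fuel with
  | zero =>
    intro c hc hf d
    have hck : c = pvK s i := by omega
    subst hck
    rw [PySem.List.pyRange_one_eq_nil (by omega)]
    rfl
  | succ fuel ih =>
    intro c hc hf d
    have hk1 := pvK_one_le s i
    have hkn := pvK_le_len s i hi
    by_cases hck : c = pvK s i
    · subst hck
      have hsp := pvK_spec s i
      rw [PySem.List.pyRange_one_eq_nil (by omega)]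
      simp only [caaWhile]
      rw [if_neg (by omega)]
      rfl
    · have hclt : c < pvK s i := by omega
      have hcond : pvVext s (i + c) ≤ s.getD i 0 + 2 := by
        rcases Nat.eq_zero_or_pos c with h0 | h1
        · subst h0
          simp only [Nat.add_zero, pvVext, if_pos hi]
          omega
        · exact pvK_min s i c h1 hclt
      rw [PySem.List.pyRange_one_cons (by push_cast; omega)]
      simp only [caaWhile, PySem.List.len_eq, List.foldl_cons]
      rw [if_pos (by omega)]
      have e3 : ((c : Int)) + 1 + 1 = ((c + 1 : Nat) : Int) + 1 := by push_cast; ring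
      rcases Nat.lt_trichotomy (i + c + 1) s.length with h1 | h1 | h1
      · -- still inside the first lap
        rw [if_pos (show i + c < s.length by omega)]
        rw [if_neg (show ¬ ((((i + c : Nat) : Int)) + 1 ≥ (s.length : Int)) by omega)]
        have e1 : (((i + c : Nat) : Int)) + 1 = ((i + c + 1 : Nat) : Int) := by omega
        rw [e1, PySem.List.pyGetD_natCast, PySem.List.pyGetD_natCast]
        have e2 : 1 + pvVext s (i + c) - s.getD i 0 + (s.getD (i + c + 1) 0 - s.getD (i + c) 0)
            = 1 + pvVext s (i + (c + 1)) - s.getD i 0 := by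
          simp only [pvVext, if_pos (show i + c < s.length by omega),
            if_pos (show i + (c + 1) < s.length by omega)]
          ring
        rw [e2, e3]
        have H := ih (c + 1) (by omega) (by omega) (d.modify ((c : Int) + 1) 0 (· + 1))
        rw [if_pos (show i + (c + 1) < s.length by omega), PySem.List.len_eq] at H
        exact H
      · -- wrap: the walk passes position n-1
        rw [if_pos (show i + c < s.length by omega)]
        rw [if_pos (show (((i + c : Nat) : Int)) + 1 ≥ (s.length : Int) by omega)]
        rw [PySem.List.pyGetD_natCast, PySem.List.pyGetD_ofNat']
        have e2 : 1 + pvVext s (i + c) - s.getD i 0 + (s.getD 0 0 + 5 * 53 - s.getD (i + c) 0)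
            = 1 + pvVext s (i + (c + 1)) - s.getD i 0 := by
          have hz : i + (c + 1) - s.length = 0 := by omega
          simp only [pvVext, if_pos (show i + c < s.length by omega),
            if_neg (show ¬ (i + (c + 1) < s.length) by omega), hz]
          ring
        rw [e2, e3]
        have H := ih (c + 1) (by omega) (by omega) (d.modify ((c : Int) + 1) 0 (· + 1))
        rw [if_neg (show ¬ (i + (c + 1) < s.length) by omega),
          (show i + (c + 1) - s.length = 0 by omega), PySem.List.len_eq] at H
        exact H
      · -- second lap
        rw [if_neg (show ¬ (i + c < s.length) by omega)]
        rw [if_neg (show ¬ ((((i + c - s.length : Nat) : Int)) + 1 ≥ (s.length : Int)) by omega)]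
        have e1 : (((i + c - s.length : Nat) : Int)) + 1 = ((i + c + 1 - s.length : Nat) : Int) := by
          omega
        rw [e1, PySem.List.pyGetD_natCast, PySem.List.pyGetD_natCast]
        have e2 : 1 + pvVext s (i + c) - s.getD i 0
              + (s.getD (i + c + 1 - s.length) 0 - s.getD (i + c - s.length) 0)
            = 1 + pvVext s (i + (c + 1)) - s.getD i 0 := by
          simp only [pvVext, if_neg (show ¬ (i + c < s.length) by omega),
            if_neg (show ¬ (i + (c + 1) < s.length) by omega)]
          have hee : i + (c + 1) - s.length = i + c + 1 - s.length := by omega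
          rw [hee]
          ring
        rw [e2, e3]
        have H := ih (c + 1) (by omega) (by omega) (d.modify ((c : Int) + 1) 0 (· + 1))
        rw [if_neg (show ¬ (i + (c + 1) < s.length) by omega),
          (show i + (c + 1) - s.length = i + c + 1 - s.length by omega), PySem.List.len_eq] at H
        exact H

lemma caaWhile_start (s : List Int) (i : Nat) (hi : i < s.length) (d : PySem.Dict Int Int) :
    caaWhile s (PySem.List.len s) (s.length + 1) d 1 (i : Int) 1
    = (pvBlock (pvK s i)).foldl (fun d z => d.modify z 0 (· + 1)) d := by
  have hk1 := pvK_one_le s i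
  have hkn := pvK_le_len s i hi
  have H := caaWhile_spec s i hi (s.length + 1) 0 (by omega) (by omega) d
  rw [if_pos (show i + 0 < s.length by omega)] at H
  simp only [Nat.add_zero, Nat.cast_zero, zero_add] at H
  have hv : pvVext s i = s.getD i 0 := by simp [pvVext, hi]
  rw [hv] at H
  have e : 1 + s.getD i 0 - s.getD i 0 = 1 := by ring
  rw [e] at H
  rw [PySem.List.len_eq]
  exact H

-- A's whole computation is Counter(S) where S lists the sizes 1..pvK i for every start i.
lemma countA_eq (shards : List Int) :
    count_all_clusters shards
    = (PySem.Dict.counter (pvS (PySem.List.sorted shards (fun x => x)))).items := by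
  simp only [count_all_clusters]
  congr 1
  rw [PySem.List.enumerate_eq_map_pyRange _ 0, PySem.List.len_eq, PySem.List.pyRange_zero_nat,
    List.foldl_map, List.foldl_map, PySem.Dict.counter_eq_foldl]
  unfold pvS pvKs
  rw [List.foldl_flatten, List.foldl_map, List.foldl_map]
  apply PySem.List.foldl_congr_mem
  intro acc i hi
  have hi' := List.mem_range.mp hi
  rw [← PySem.List.len_eq]
  exact caaWhile_start _ i hi' acc

-- B's reach value equals pvK.
lemma caaReach_eq (s : List Int) (hs : List.Pairwise (· ≤ ·) s) (i : Nat) (hi : i < s.length) :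
    caaReach s s.length ((i : Int), PySem.List.pyGetD s (i : Int) 0) = (pvK s i : Int) := by
  have hgd : PySem.List.pyGetD s (i : Int) 0 = s.getD i 0 := PySem.List.pyGetD_natCast s i 0
  have hgi : s.getD i 0 = s[i] := List.getD_eq_getElem s 0 hi
  simp only [caaReach, hgd, show (s.getD i 0 + 3 - 1 : Int) = s.getD i 0 + 2 from by ring,
    show (s.getD i 0 + 2 - 5 * 53 : Int) = s.getD i 0 + 2 - 265 from by ring]
  obtain ⟨hj1, hj2, hj3⟩ := PySem.List.bisectRight_spec s (s.getD i 0 + 2) hs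
  by_cases hcase : PySem.List.bisectRight s (s.getD i 0 + 2) < s.length
  · rw [if_pos hcase]
    set j := PySem.List.bisectRight s (s.getD i 0 + 2) with hj
    have hij : i < j := by
      by_contra hc
      have := hj3 i hi (by omega)
      omega
    have hk : pvK s i = j - i := by
      unfold pvK
      rw [Nat.find_eq_iff]
      refine ⟨⟨by omega, ?_⟩, ?_⟩
      · have hlt : i + (j - i) < s.length := by omega
        have := hj3 (i + (j - i)) hlt (by omega)
        simp only [pvVext, if_pos hlt]
        rw [List.getD_eq_getElem s 0 hlt]
        omega
      · intro m hm hQ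
        obtain ⟨hm1, hm2⟩ := hQ
        have hlt : i + m < s.length := by omega
        have := hj2 (i + m) hlt (by omega)
        simp only [pvVext, if_pos hlt] at hm2
        rw [List.getD_eq_getElem s 0 hlt] at hm2
        omega
    rw [hk]
    omega
  · rw [if_neg hcase]
    have hjn : PySem.List.bisectRight s (s.getD i 0 + 2) = s.length := by omega
    obtain ⟨hq1, hq2, hq3⟩ := PySem.List.bisectRight_spec s (s.getD i 0 + 2 - 265) hs
    set q := PySem.List.bisectRight s (s.getD i 0 + 2 - 265) with hq
    have hqi : q ≤ i := by
      by_contra hc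
      have := hq2 i hi (by omega)
      omega
    have hk : pvK s i = s.length + q - i := by
      unfold pvK
      rw [Nat.find_eq_iff]
      refine ⟨⟨by omega, ?_⟩, ?_⟩
      · have hnlt : ¬ (i + (s.length + q - i) < s.length) := by omega
        have hql : q < s.length := by omega
        have := hq3 q hql (by omega)
        simp only [pvVext, if_neg hnlt]
        rw [show i + (s.length + q - i) - s.length = q from by omega,
          List.getD_eq_getElem s 0 hql]
        omega
      · intro m hm hQ
        obtain ⟨hm1, hm2⟩ := hQ
        by_cases hlt : i + m < s.length
        · have := hj2 (i + m) hlt (by omega)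
          simp only [pvVext, if_pos hlt] at hm2
          rw [List.getD_eq_getElem s 0 hlt] at hm2
          omega
        · have hr : i + m - s.length < q := by omega
          have hrl : i + m - s.length < s.length := by omega
          have := hq2 (i + m - s.length) hrl hr
          simp only [pvVext, if_neg hlt] at hm2
          rw [List.getD_eq_getElem s 0 hrl] at hm2
          omega
    rw [hk]
    omega

lemma pvBlock_zero : pvBlock 0 = [] := by
  unfold pvBlock
  rw [PySem.List.pyRange_one_eq_nil (by simp)]

lemma pvBlock_succ (k : Nat) : pvBlock (k + 1) = pvBlock k ++ [((k : Int) + 1)] := by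
  unfold pvBlock
  rw [show ((k + 1 : Nat) : Int) + 1 = ((k : Int) + 1) + 1 from by push_cast; ring,
    PySem.List.pyRange_one_succ_right (by omega)]

lemma mem_pvBlock (k : Nat) (z : Int) : z ∈ pvBlock k ↔ 1 ≤ z ∧ z ≤ (k : Int) := by
  unfold pvBlock
  rw [PySem.List.mem_pyRange_one]
  omega

-- the dedup of the concatenated blocks [1..k_0] ++ [1..k_1] ++ … is [1..max k].
lemma pvSet_update_block (M k : Nat) :
    PySem.Set.update (pvBlock M) (pvBlock k) = pvBlock (max M k) := by
  induction k with
  | zero => rw [pvBlock_zero, PySem.Set.update_nil, Nat.max_zero]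
  | succ k ih =>
    rw [pvBlock_succ, PySem.Set.update_append, ih, PySem.Set.update_cons, PySem.Set.update_nil]
    by_cases h : k + 1 ≤ M
    · rw [PySem.Set.add_of_mem ((mem_pvBlock _ _).mpr ⟨by omega, by
        have h2 : M ≤ max M k := le_max_left M k
        omega⟩)]
      rw [show max M k = M from by omega, show max M (k + 1) = M from by omega]
    · have hMk : max M k = k := by omega
      have hMk1 : max M (k + 1) = k + 1 := by omega
      rw [PySem.Set.add_of_not_mem (by
        rw [mem_pvBlock, hMk]
        omega)]
      rw [hMk, hMk1, ← pvBlock_succ]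

lemma pvSet_update_S (ks : List Nat) : ∀ M : Nat,
    PySem.Set.update (pvBlock M) ((ks.map pvBlock).flatten) = pvBlock (ks.foldl max M) := by
  induction ks with
  | nil =>
    intro M
    simp only [List.map_nil, List.flatten_nil, List.foldl_nil, PySem.Set.update_nil]
  | cons k ks ih =>
    intro M
    simp only [List.map_cons, List.flatten_cons, List.foldl_cons]
    rw [PySem.Set.update_append, pvSet_update_block, ih]

lemma pvSet_ofList_S (ks : List Nat) :
    PySem.Set.ofList ((ks.map pvBlock).flatten) = pvBlock (ks.foldl max 0) := by
  have h := pvSet_update_S ks 0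
  rw [pvBlock_zero] at h
  rw [← h, PySem.Set.ofList_eq_foldl]
  rfl

lemma count_pvBlock (k : Nat) (z : Int) (hz : 1 ≤ z) :
    (pvBlock k).count z = if z ≤ (k : Int) then 1 else 0 := by
  by_cases h : z ≤ (k : Int)
  · rw [if_pos h]
    exact List.count_eq_one_of_mem
      (by unfold pvBlock; exact PySem.List.nodup_pyRange_one _ _)
      ((mem_pvBlock _ _).mpr ⟨hz, h⟩)
  · rw [if_neg h]
    exact List.count_eq_zero_of_not_mem (by rw [mem_pvBlock]; omega)

-- counting a size z in the concatenated blocks counts the starts whose reach is ≥ z.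
lemma pvS_count (ks : List Nat) (z : Int) (hz : 1 ≤ z) :
    ((ks.map pvBlock).flatten).count z = ks.countP (fun (k : Nat) => decide (z ≤ (k : Int))) := by
  induction ks with
  | nil => simp
  | cons k ks ih =>
    simp only [List.map_cons, List.flatten_cons, List.count_append, List.countP_cons, ih,
      count_pvBlock k z hz]
    by_cases h : z ≤ (k : Int) <;> simp [h] <;> omega

-- B's reach loop produces exactly the pvK values.
lemma reach_eq_list (s : List Int) (hs : List.Pairwise (· ≤ ·) s) :
    (PySem.List.enumerate s).foldl (fun acc p => acc ++ [caaReach s s.length p]) []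
    = (pvKs s).map (fun (k : Nat) => (k : Int)) := by
  rw [PySem.List.foldl_append_singleton_eq_map, List.nil_append,
    PySem.List.enumerate_eq_map_pyRange s 0, PySem.List.len_eq, PySem.List.pyRange_zero_nat,
    List.map_map, List.map_map]
  unfold pvKs
  rw [List.map_map]
  apply List.map_congr_left
  intro i hi
  exact caaReach_eq s hs i (List.mem_range.mp hi)

lemma foldl_max_cast (l : List Nat) : ∀ a : Nat,
    (l.map (fun (k : Nat) => (k : Int))).foldl max ((a : Nat) : Int) = ((l.foldl max a : Nat) : Int) := by
  induction l with
  | nil => intro a; rfl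
  | cons k t ih =>
    intro a
    simp only [List.map_cons, List.foldl_cons]
    rw [show (max ((a : Nat) : Int) ((k : Nat) : Int)) = ((max a k : Nat) : Int) from
      (Nat.cast_max a k).symm, ih]

lemma countP_ge_split (l : List Int) (a : Int) :
    l.countP (fun x => decide (a ≤ x)) = l.count a + l.countP (fun x => decide (a + 1 ≤ x)) := by
  induction l with
  | nil => simp
  | cons x t ih =>
    simp only [List.countP_cons, List.count_cons, ih, beq_iff_eq, decide_eq_true_eq]
    split_ifs <;> omega

-- the running count of reaches ≥ z, as an Int
def pvC (rs : List Int) (z : Int) : Int := ((rs.countP (fun x => decide (z ≤ x)) : Nat) : Int)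

lemma pvC_step (rs : List Int) (a : Int) : pvC rs a = pvC rs (a + 1) + (rs.count a : Int) := by
  unfold pvC
  rw [countP_ge_split rs a]
  push_cast
  ring

-- B's descending suffix-sum loop fills ge[z] with pvC rs z for 1 ≤ z ≤ kmax.
lemma sg_spec (rs : List Int) :
    ∀ (n : Nat) (ge : PySem.Dict Int Int), ∃ ge' : PySem.Dict Int Int,
    (PySem.List.pyRange ((n : Nat) : Int) 0 (-1)).foldl
        (fun (st : Int × PySem.Dict Int Int) size =>
          (st.1 + (PySem.Dict.counter rs).getD size 0,
           st.2.insert size (st.1 + (PySem.Dict.counter rs).getD size 0)))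
        (pvC rs (((n : Nat) : Int) + 1), ge)
      = (pvC rs 1, ge')
    ∧ (∀ z : Int, 1 ≤ z → z ≤ ((n : Nat) : Int) → ge'.getD z 0 = pvC rs z)
    ∧ (∀ z : Int, ((n : Nat) : Int) < z → ge'.getD z 0 = ge.getD z 0) := by
  intro n
  induction n with
  | zero =>
    intro ge
    refine ⟨ge, ?_, ?_, ?_⟩
    · rw [PySem.List.pyRange_neg_one_eq_nil (by simp)]
      simp
    · intro z hz1 hz2
      simp at hz2
      omega
    · intro z hz
      rfl
  | succ n ih =>
    intro ge
    obtain ⟨ge', hEq, h1, h2⟩ := ih (ge.insert ((n : Int) + 1) (pvC rs ((n : Int) + 1)))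
    refine ⟨ge', ?_, ?_, ?_⟩
    · rw [PySem.List.pyRange_neg_one_cons (by push_cast; omega), List.foldl_cons]
      have ha : (((n + 1 : Nat) : Int)) = (n : Int) + 1 := by push_cast; ring
      rw [ha, show ((n : Int) + 1 - 1) = ((n : Nat) : Int) from by ring]
      rw [PySem.Dict.getD_counter]
      rw [show pvC rs ((n : Int) + 1 + 1) + (rs.count ((n : Int) + 1) : Int)
          = pvC rs (((n : Nat) : Int) + 1) from by rw [pvC_step rs ((n : Int) + 1)]]
      exact hEq
    · intro z hz1 hz2
      by_cases hz : z ≤ (n : Int)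
      · exact h1 z hz1 hz
      · have hzz : z = (n : Int) + 1 := by push_cast at hz2; omega
        rw [h2 z (by omega), hzz, PySem.Dict.getD_insert]
        rw [if_pos rfl]
    · intro z hz
      rw [h2 z (by push_cast at hz; omega), PySem.Dict.getD_insert]
      rw [if_neg (by push_cast at hz; omega)]

lemma countAB (shards : List Int) : count_all_clusters shards = count_all_clusters_alt shards := by
  rw [countA_eq]
  simp only [count_all_clusters_alt]
  by_cases hn : (PySem.List.sorted shards (fun x => x)).length = 0
  · rw [if_pos hn, List.length_eq_zero_iff.mp hn]
    rfl
  · rw [if_neg hn]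
    set s := PySem.List.sorted shards (fun x => x) with hs
    have hsp : List.Pairwise (· ≤ ·) s := PySem.List.sorted_pairwise shards (fun x => x)
    rw [reach_eq_list s hsp]
    set rs := (pvKs s).map (fun (k : Nat) => (k : Int)) with hrs
    have hlen : (pvKs s).length = s.length := by unfold pvKs; simp
    obtain ⟨k0, kt, hks⟩ : ∃ k0 kt, pvKs s = k0 :: kt := by
      cases h : pvKs s with
      | nil => rw [h] at hlen; simp at hlen; omega
      | cons a b => exact ⟨a, b, rfl⟩
    have hmax : PySem.List.max? rs (fun y => y) = some ((pvKmax s : Nat) : Int) := by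
      rw [hrs, hks]
      simp only [List.map_cons]
      rw [PySem.List.max?_id_cons, foldl_max_cast kt k0]
      unfold pvKmax
      rw [hks]
      simp only [List.foldl_cons, Nat.zero_max]
    rw [hmax]
    have hb : ∀ x ∈ rs, x ≤ ((pvKmax s : Nat) : Int) := by
      intro x hx
      rw [hrs] at hx
      obtain ⟨k, hk, rfl⟩ := List.mem_map.mp hx
      have := (PySem.List.le_foldl_max (pvKs s) 0).2 k hk
      unfold pvKmax
      omega
    obtain ⟨ge', hEq, h1, h2⟩ := sg_spec rs (pvKmax s) PySem.Dict.empty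
    have h0 : pvC rs (((pvKmax s : Nat) : Int) + 1) = 0 := by
      unfold pvC
      rw [List.countP_eq_zero.mpr]
      · simp
      · intro x hx
        have := hb x hx
        simp only [decide_eq_true_eq]
        omega
    rw [h0] at hEq
    dsimp only
    rw [hEq]
    rw [PySem.Dict.items_foldl_insert_fresh _ (fun z => z) _ _
      (by intro a _; exact PySem.Dict.contains_empty a)
      (by rw [show (List.map (fun z => z) (PySem.List.pyRange 1 (((pvKmax s : Nat) : Int) + 1)))
            = PySem.List.pyRange 1 (((pvKmax s : Nat) : Int) + 1) from List.map_id' _]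
          exact PySem.List.nodup_pyRange_one _ _)]
    rw [PySem.Dict.items_counter]
    unfold pvS
    rw [pvSet_ofList_S (pvKs s)]
    have hKm : (pvKs s).foldl max 0 = pvKmax s := rfl
    rw [hKm]
    have hblock : pvBlock (pvKmax s) = PySem.List.pyRange 1 (((pvKmax s : Nat) : Int) + 1) := rfl
    rw [hblock]
    simp only [show (PySem.Dict.empty : PySem.Dict Int Int).items = [] from rfl,
      List.nil_append]
    apply List.map_congr_left
    intro z hz
    obtain ⟨hz1, hz2⟩ := PySem.List.mem_pyRange_one.mp hz
    have hcount : (((pvKs s).map pvBlock).flatten).count z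
        = rs.countP (fun x => decide (z ≤ x)) := by
      rw [pvS_count (pvKs s) z hz1, hrs, List.countP_map]
      rfl
    rw [h1 z hz1 (by omega)]
    unfold pvC
    rw [hcount]

theorem count_all_clusters_spec : Claim_equal_count_all_clusters := by
  unfold Claim_equal_count_all_clusters Spec_count_all_clusters
  intro shards _
  exact countAB shards
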